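-- pv_equiv track=rewrite | github.com/megascienta/sciona | src/sciona/code_analysis/core/extract/languages/type_names.py | type_base_name
-- ===== SOURCE A (Python) =====
-- def type_base_name(type_text: str) -> str:
--     text = type_text.strip().lstrip(":").strip()
--     if not text:
--         return ""
--     text = _strip_prefix(text, "readonly ")
--     text = _strip_prefix(text, "new ")
--     text = _strip_suffix(text, "?")
--     text = _strip_suffix(text, "!")
--     text = _strip_arrays(text)
--     if "|" in text:
--         text = text.split("|", 1)[0].strip()
--     if "&" in text:
--         text = text.split("&", 1)[0].strip()
--     for open_char, close_char in (("<", ">"), ("[", "]")):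
--         inner = _outer_type_argument(text, open_char, close_char)
--         if inner is not None:
--             first_arg = _first_top_level_segment(inner)
--             return type_base_name(first_arg)
--     return text
--
-- def _outer_type_argument(text: str, open_char: str, close_char: str) -> str | None:
--     start = text.find(open_char)
--     if start <= 0 or not text.endswith(close_char):
--         return None
--     depth = 0
--     for idx, char in enumerate(text[start:], start=start):
--         if char == open_char:
--             depth += 1
--         elif char == close_char:
--             depth -= 1
--             if depth == 0:
--                 if idx != len(text) - 1:
--                     return None
--                 return text[start + 1 : idx].strip()
--     return None
--
-- def _first_top_level_segment(text: str) -> str: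
--     depth_angle = 0
--     depth_square = 0
--     for idx, char in enumerate(text):
--         if char == "<":
--             depth_angle += 1
--         elif char == ">":
--             depth_angle = max(0, depth_angle - 1)
--         elif char == "[":
--             depth_square += 1
--         elif char == "]":
--             depth_square = max(0, depth_square - 1)
--         elif char == "," and depth_angle == 0 and depth_square == 0:
--             return text[:idx].strip()
--     return text.strip()
--
-- def _strip_prefix(text: str, prefix: str) -> str:
--     if text.startswith(prefix):
--         return text[len(prefix) :].strip()
--     return text
--
-- def _strip_suffix(text: str, suffix: str) -> str:
--     if text.endswith(suffix):
--         return text[: -len(suffix)].strip()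
--     return text
--
-- def _strip_arrays(text: str) -> str:
--     normalized = text
--     while normalized.endswith("[]"):
--         normalized = normalized[:-2].strip()
--     return normalized
-- ===== SOURCE B (Python) =====
-- def type_base_name(type_text: str) -> str:
--     text = type_text
--     while True:
--         text = text.strip().lstrip(":").strip()
--         if not text:
--             return ""
--         for prefix in ("readonly ", "new "):
--             if text.startswith(prefix):
--                 text = text[len(prefix):].strip()
--         for suffix in ("?", "!"):
--             if text.endswith(suffix):
--                 text = text[:-1].strip()
--         while text.endswith("[]"):
--             text = text[:-2].strip()
--         cut = text
--         for idx, char in enumerate(text):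
--             if char in "|&":
--                 cut = text[:idx]
--                 break
--         if len(cut) < len(text):
--             text = cut.strip()
--         inner = _angle_or_square_inner(text)
--         if inner is None:
--             return text
--         text = _first_segment(inner)
--
-- def _angle_or_square_inner(text):
--     for open_char, close_char in (("<", ">"), ("[", "]")):
--         if not text.endswith(close_char):
--             continue
--         start = text.find(open_char)
--         if start <= 0:
--             continue
--         depth = 0
--         balanced = True
--         for char in text[start:-1]:
--             if char == open_char:
--                 depth += 1
--             elif char == close_char:
--                 depth -= 1
--                 if depth == 0:
--                     balanced = False
--                     break
--         if balanced and depth == 1: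
--             return text[start + 1:-1].strip()
--     return None
--
-- def _first_segment(text):
--     depth_angle = 0
--     depth_square = 0
--     for idx, char in enumerate(text):
--         if char == "<":
--             depth_angle += 1
--         elif char == ">":
--             depth_angle = max(0, depth_angle - 1)
--         elif char == "[":
--             depth_square += 1
--         elif char == "]":
--             depth_square = max(0, depth_square - 1)
--         elif char == "," and depth_angle == 0 and depth_square == 0:
--             return text[:idx].strip()
--     return text.strip()
-- ===== Notes on version B (the rewrite author's own statement) =====
-- stated objective: alternative
-- what changed: The tail self-recursion is rewritten as an explicit while-True loop, the two sequential one-character split passes (union then intersection separator) are fused into a single scan for the first cut character, and the bracket check is re-expressed as a balanced depth scan over the slice between the first opener and the final closer instead of an indexed early-return walk.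
import Mathlib
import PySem

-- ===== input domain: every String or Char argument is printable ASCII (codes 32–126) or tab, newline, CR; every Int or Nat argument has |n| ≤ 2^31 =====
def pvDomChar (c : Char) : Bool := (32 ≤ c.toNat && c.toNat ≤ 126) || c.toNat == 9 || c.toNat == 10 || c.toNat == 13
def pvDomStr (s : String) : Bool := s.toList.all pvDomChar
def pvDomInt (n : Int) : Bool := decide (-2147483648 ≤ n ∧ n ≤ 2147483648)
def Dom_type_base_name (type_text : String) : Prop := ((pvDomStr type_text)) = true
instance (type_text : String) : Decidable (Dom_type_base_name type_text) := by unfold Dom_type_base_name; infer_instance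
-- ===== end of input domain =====

-- B rewrites the tail self-recursion as an explicit loop, fuses the two split('|')/split('&')
-- passes into one scan for the first cut character, and re-expresses the bracket check as a
-- balanced-scan over text[start:-1]; objective: alternative (same cost, different decomposition).

-- ===== PORT A =====
-- shared low-level helpers (these lines of Python are identical in A and in Source B):
-- .lstrip(":") ported by hand: drops the leading ':' characters (exact for a 1-char strip set)
def pvLstripColon (cs : List Char) : List Char := cs.dropWhile (· == ':')

-- _strip_arrays (identical helper in A and Source B); fuel = initial length, always sufficient
-- since each pass removes "[]" (2 chars) and strip never lengthens
def pvStripArraysGo : Nat → List Char → List Char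
  | 0, cs => cs
  | n+1, cs =>
    if PySem.Chars.endswith cs ['[', ']'] then
      pvStripArraysGo n (PySem.Chars.strip (cs.take (cs.length - 2)))
    else cs
def pvStripArrays (cs : List Char) : List Char := pvStripArraysGo cs.length cs

-- _first_top_level_segment (identical helper in A and Source B)
def pvFirstSegGo (full : List Char) : List Char → Nat → Int → Int → List Char
  | [], _, _, _ => PySem.Chars.strip full
  | ch :: rest, idx, da, ds =>
    if ch == '<' then pvFirstSegGo full rest (idx+1) (da+1) ds
    else if ch == '>' then pvFirstSegGo full rest (idx+1) (max 0 (da-1)) ds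
    else if ch == '[' then pvFirstSegGo full rest (idx+1) da (ds+1)
    else if ch == ']' then pvFirstSegGo full rest (idx+1) da (max 0 (ds-1))
    else if ch == ',' && da == 0 && ds == 0 then PySem.Chars.strip (full.take idx)
    else pvFirstSegGo full rest (idx+1) da ds
def pvFirstSeg (cs : List Char) : List Char := pvFirstSegGo cs cs 0 0 0

-- A's _strip_prefix
def pvStripPrefixA (cs pre : List Char) : List Char :=
  if PySem.Chars.startswith cs pre then PySem.Chars.strip (cs.drop pre.length) else cs
-- A's _strip_suffix
def pvStripSuffixA (cs suf : List Char) : List Char :=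
  if PySem.Chars.endswith cs suf then PySem.Chars.strip (cs.take (cs.length - suf.length)) else cs
-- A's text.split(sep, 1)[0]  (split never returns [], so the [] arm is unreachable)
def pvSplitHeadA (cs : List Char) (sep : Char) : List Char :=
  match PySem.Chars.splitOnMax cs [sep] 1 with
  | x :: _ => x
  | [] => []
-- A's _outer_type_argument: loop over enumerate(text[start:], start=start)
def pvOuterGoA (o c : Char) (full : List Char) (start : Nat) :
    List Char → Nat → Int → Option (List Char)
  | [], _, _ => none
  | ch :: rest, idx, depth =>
    if ch == o then pvOuterGoA o c full start rest (idx+1) (depth+1)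
    else if ch == c then
      if depth - 1 == 0 then
        if idx ≠ full.length - 1 then none
        else some (PySem.Chars.strip
          (PySem.List.slice full (some ((start+1 : Nat) : Int)) (some ((idx : Nat) : Int))))
      else pvOuterGoA o c full start rest (idx+1) (depth-1)
    else pvOuterGoA o c full start rest (idx+1) depth
def pvOuterA (cs : List Char) (o c : Char) : Option (List Char) :=
  let start := PySem.Chars.find cs [o]
  if start ≤ 0 || !(PySem.Chars.endswith cs [c]) then none
  else pvOuterGoA o c cs start.toNat (cs.drop start.toNat) start.toNat 0

-- the four prefix/suffix strip lines of A's body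
def pvNormA (text : List Char) : List Char :=
  let text := pvStripPrefixA text "readonly ".toList
  let text := pvStripPrefixA text "new ".toList
  let text := pvStripSuffixA text ['?']
  let text := pvStripSuffixA text ['!']
  pvStripArrays text
-- A's two 'if … in text: text = text.split(…, 1)[0].strip()' lines
def pvCutA (text : List Char) : List Char :=
  let text := if PySem.Chars.isIn ['|'] text then PySem.Chars.strip (pvSplitHeadA text '|') else text
  if PySem.Chars.isIn ['&'] text then PySem.Chars.strip (pvSplitHeadA text '&') else text
-- one call of A's body; 'rec' stands for the recursive call type_base_name(...)
def pvStepA (rec : List Char → List Char) (cs : List Char) : List Char :=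
  let text := PySem.Chars.strip (pvLstripColon (PySem.Chars.strip cs))
  if text = [] then []
  else
    let text := pvCutA (pvNormA text)
    match pvOuterA text '<' '>' with
    | some inner => rec (pvFirstSeg inner)
    | none =>
      match pvOuterA text '[' ']' with
      | some inner => rec (pvFirstSeg inner)
      | none => text
-- A's recursion, with fuel = |input| + 1 (each recursive call shrinks the text by ≥ 2)
def pvTbnA : Nat → List Char → List Char
  | 0, _ => []
  | fuel+1, cs => pvStepA (pvTbnA fuel) cs

def type_base_name (type_text : String) : String :=
  String.ofList (pvTbnA (type_text.toList.length + 1) type_text.toList)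

-- ===== PORT B =====
-- Source B's single scan for the first '|' or '&': the loop computes the prefix before the first
-- cut character (cut = text when there is none)
def pvCutB (cs : List Char) : List Char :=
  let cut := cs.takeWhile (fun ch => !(ch == '|' || ch == '&'))
  if cut.length < cs.length then PySem.Chars.strip cut else cs
-- Source B's balanced scan over text[start:-1]: none = broke on a zero crossing, some d = final depth
def pvBscan (o c : Char) : List Char → Int → Option Int
  | [], depth => some depth
  | ch :: rest, depth =>
    if ch == o then pvBscan o c rest (depth+1)
    else if ch == c then
      if depth - 1 == 0 then none else pvBscan o c rest (depth-1)
    else pvBscan o c rest depth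
-- one bracket pair of Source B's _angle_or_square_inner
def pvInnerB1 (cs : List Char) (o c : Char) : Option (List Char) :=
  if !(PySem.Chars.endswith cs [c]) then none
  else
    let start := PySem.Chars.find cs [o]
    if start ≤ 0 then none
    else
      match pvBscan o c ((cs.drop start.toNat).dropLast) 0 with
      | none => none
      | some d => if d == 1 then some (PySem.Chars.strip ((cs.drop (start.toNat+1)).dropLast)) else none
def pvInnerB (cs : List Char) : Option (List Char) :=
  match pvInnerB1 cs '<' '>' with
  | some r => some r
  | none => pvInnerB1 cs '[' ']'

-- Source B's two for-loops over the prefix/suffix tuples, then the array strip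
def pvNormB (text : List Char) : List Char :=
  let text := [("readonly ".toList), ("new ".toList)].foldl
    (fun t pre => if PySem.Chars.startswith t pre then PySem.Chars.strip (t.drop pre.length) else t) text
  let text := [('?' : Char), '!'].foldl
    (fun t suf => if PySem.Chars.endswith t [suf] then PySem.Chars.strip (t.take (t.length - 1)) else t) text
  pvStripArrays text
-- one iteration of Source B's loop body; 'rec' stands for 'set text and continue the loop'
def pvStepB (rec : List Char → List Char) (cs : List Char) : List Char :=
  let text := PySem.Chars.strip (pvLstripColon (PySem.Chars.strip cs))
  if text = [] then []
  else
    let text := pvCutB (pvNormB text)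
    match pvInnerB text with
    | none => text
    | some inner => rec (pvFirstSeg inner)
-- Source B's 'while True' loop, with the same fuel as A's recursion
def pvBLoop : Nat → List Char → List Char
  | 0, _ => []
  | fuel+1, cs => pvStepB (pvBLoop fuel) cs

def type_base_name_alt (type_text : String) : String :=
  String.ofList (pvBLoop (type_text.toList.length + 1) type_text.toList)

-- ===== PRECONDITION & SPEC =====
def Spec_type_base_name (type_text : String) (out : String) : Prop := out = type_base_name_alt type_text
instance (type_text : String) (out : String) : Decidable (Spec_type_base_name type_text out) := by unfold Spec_type_base_name; infer_instance

-- ===== CLAIM (what is proved, stated in full; the proofs are below) =====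
def Claim_equal_type_base_name : Prop := ∀ (type_text : String), Dom_type_base_name type_text → Spec_type_base_name type_text (type_base_name type_text)

-- ===== LEMMAS AND PROOFS =====


theorem pv_takeWhile_all_append {α : Type} (p : α → Bool) (l₁ l₂ : List α)
    (h : ∀ c ∈ l₁, p c = true) : (l₁ ++ l₂).takeWhile p = l₁ ++ l₂.takeWhile p := by
  induction l₁ with
  | nil => simp
  | cons x l ih =>
    have hx := h x (by simp)
    simp [hx, ih (fun c hc => h c (by simp [hc]))]

theorem pv_takeWhile_stop {α : Type} (p : α → Bool) (l₁ l₂ : List α) (x : α)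
    (h : ∀ c ∈ l₁, p c = true) (hx : p x = false) :
    (l₁ ++ x :: l₂).takeWhile p = l₁ := by
  rw [pv_takeWhile_all_append p l₁ (x :: l₂) h]
  simp [hx]

theorem pv_takeWhile_append_left {α : Type} (p : α → Bool) (l₁ l₂ : List α)
    (h : ∃ c ∈ l₁, p c = false) : (l₁ ++ l₂).takeWhile p = l₁.takeWhile p := by
  induction l₁ with
  | nil => simp at h
  | cons x l ih =>
    by_cases hx : p x = true
    · obtain ⟨c, hc, hcp⟩ := h
      rcases List.mem_cons.1 hc with h' | h'
      · rw [h', hx] at hcp; cases hcp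
      · simp [hx, ih ⟨c, h', hcp⟩]
    · simp only [Bool.not_eq_true] at hx
      simp [hx]

theorem pv_first_split {α : Type} [DecidableEq α] (a : α) (l : List α) (h : a ∈ l) :
    ∃ l₂, l = l.takeWhile (fun c => c != a) ++ a :: l₂ := by
  induction l with
  | nil => cases h
  | cons x l ih =>
    by_cases hx : x = a
    · exact ⟨l, by subst hx; simp⟩
    · rcases List.mem_cons.1 h with h' | h'
      · exact absurd h'.symm hx
      · obtain ⟨l₂, hl₂⟩ := ih h'
        refine ⟨l₂, ?_⟩
        simp only [List.takeWhile_cons, bne_iff_ne, ne_eq, hx, not_false_eq_true, if_pos]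
        simp only [List.cons_append]
        exact congrArg (x :: ·) hl₂

theorem pv_lstrip_decomp (cs : List Char) :
    cs = cs.takeWhile PySem.Chars.isspace ++ PySem.Chars.lstrip cs := by
  simp [PySem.Chars.lstrip]

theorem pv_rstrip_decomp (cs : List Char) :
    ∃ w, cs = PySem.Chars.rstrip cs ++ w ∧ ∀ c ∈ w, PySem.Chars.isspace c = true := by
  refine ⟨(cs.reverse.takeWhile PySem.Chars.isspace).reverse, ?_, ?_⟩
  · have h := List.takeWhile_append_dropWhile (p := PySem.Chars.isspace) (l := cs.reverse)
    calc cs = cs.reverse.reverse := by simp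
    _ = ((cs.reverse.takeWhile PySem.Chars.isspace) ++ (cs.reverse.dropWhile PySem.Chars.isspace)).reverse := by rw [h]
    _ = _ := by rw [List.reverse_append]; rfl
  · intro c hc
    rw [List.mem_reverse] at hc
    exact List.mem_takeWhile_imp hc

theorem pv_strip_ws_append (w x : List Char) (hw : ∀ c ∈ w, PySem.Chars.isspace c = true) :
    PySem.Chars.strip (w ++ x) = PySem.Chars.strip x := by
  have : PySem.Chars.lstrip (w ++ x) = PySem.Chars.lstrip x := by
    simp only [PySem.Chars.lstrip, List.dropWhile_append]
    rw [if_pos]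
    simp only [List.isEmpty_iff, List.dropWhile_eq_nil_iff]
    exact hw
  simp [PySem.Chars.strip, this]

theorem pv_mem_lstrip {cs : List Char} {a : Char} (ha : PySem.Chars.isspace a = false)
    (h : a ∈ cs) : a ∈ PySem.Chars.lstrip cs := by
  conv at h => rw [pv_lstrip_decomp cs]
  rcases List.mem_append.1 h with h' | h'
  · rw [List.mem_takeWhile_imp h'] at ha; cases ha
  · exact h'

theorem pv_mem_of_mem_strip {cs : List Char} {a : Char}
    (h : a ∈ PySem.Chars.strip cs) : a ∈ cs := by
  simp only [PySem.Chars.strip] at h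
  obtain ⟨w, hw, _⟩ := pv_rstrip_decomp (PySem.Chars.lstrip cs)
  have h2 : a ∈ PySem.Chars.rstrip (PySem.Chars.lstrip cs) ++ w := List.mem_append.2 (Or.inl h)
  rw [← hw] at h2
  have h3 : a ∈ cs.takeWhile PySem.Chars.isspace ++ PySem.Chars.lstrip cs := List.mem_append.2 (Or.inr h2)
  rwa [← pv_lstrip_decomp cs] at h3


theorem pv_go0 (sep : List Char) (f : Nat) (l cur : List Char) (acc : List (List Char)) :
    ∃ y, PySem.Chars.splitOnMax.go sep f 0 l cur acc = (y :: acc).reverse := by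
  match f, l with
  | 0, l => exact ⟨cur.reverse ++ l, rfl⟩
  | f+1, [] => exact ⟨cur.reverse, rfl⟩
  | f+1, c :: rest => exact ⟨cur.reverse ++ c :: rest, by simp [PySem.Chars.splitOnMax.go]⟩

theorem pv_go1 (sep : Char) (l : List Char) :
    ∀ (fuel : Nat) (cur : List Char), l.length < fuel →
    ∃ rest, PySem.Chars.splitOnMax.go [sep] fuel 1 l cur [] =
      (cur.reverse ++ l.takeWhile (fun c => c != sep)) :: rest := by
  induction l with
  | nil =>
    intro fuel cur hf
    match fuel with
    | f+1 => exact ⟨[], by simp [PySem.Chars.splitOnMax.go]⟩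
  | cons x l ih =>
    intro fuel cur hf
    match fuel with
    | f+1 =>
      by_cases hx : x = sep
      · subst hx
        have hpre : [x].isPrefixOf (x :: l) = true := by simp [List.isPrefixOf]
        obtain ⟨y, hy⟩ := pv_go0 [x] f l [] [cur.reverse]
        refine ⟨[y], ?_⟩
        simp only [PySem.Chars.splitOnMax.go, hpre]
        norm_num
        rw [hy]
        simp
      · have hpre : [sep].isPrefixOf (x :: l) = false := by
          simp [List.isPrefixOf, beq_eq_false_iff_ne, Ne.symm hx]
        obtain ⟨rest, hr⟩ := ih f (x :: cur) (by simp at hf; omega)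
        refine ⟨rest, ?_⟩
        simp only [PySem.Chars.splitOnMax.go, hpre]
        simp only [Bool.false_eq_true, if_false, Nat.one_ne_zero, if_false]
        rw [hr]
        simp [bne_iff_ne, hx]

theorem pvSplitHeadA_eq' (cs : List Char) (sep : Char) :
    (match PySem.Chars.splitOnMax cs [sep] 1 with
     | x :: _ => x | [] => ([] : List Char)) = cs.takeWhile (fun ch => ch != sep) := by
  obtain ⟨rest, hr⟩ := pv_go1 sep cs (cs.length + 1) [] (by omega)
  simp [PySem.Chars.splitOnMax, hr]

theorem pv_isIn_singleton (a : Char) (t : List Char) :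
    PySem.Chars.isIn [a] t = true ↔ a ∈ t := by
  rw [PySem.Chars.isIn_iff_infix]
  exact List.singleton_infix_iff a t

theorem pvSplitHeadA_eq (cs : List Char) (sep : Char) :
    pvSplitHeadA cs sep = cs.takeWhile (fun ch => ch != sep) := by
  unfold pvSplitHeadA; exact pvSplitHeadA_eq' cs sep

theorem pv_strip_eq_rstrip_lstrip (u : List Char) :
    PySem.Chars.strip u = PySem.Chars.rstrip (PySem.Chars.lstrip u) := rfl

theorem pvCut_eq (t : List Char) : pvCutA t = pvCutB t := by
  unfold pvCutA
  have hspAmp : PySem.Chars.isspace '&' = false := by decide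
  simp only [pvSplitHeadA_eq]
  by_cases h1 : '|' ∈ t
  · rw [if_pos ((pv_isIn_singleton '|' t).2 h1)]
    set u := t.takeWhile (fun c => c != '|') with hu
    obtain ⟨r, hr⟩ := pv_first_split '|' t h1
    rw [← hu] at hr
    have humem : ∀ c ∈ u, c ≠ '|' := by
      intro c hc
      have := List.mem_takeWhile_imp (p := fun c => c != '|') (hu ▸ hc)
      simpa using this
    by_cases h2 : '&' ∈ u
    · -- both cut characters present; the first one is the '&' inside u
      set v := u.takeWhile (fun c => c != '&') with hv
      obtain ⟨r', hr'⟩ := pv_first_split '&' u h2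
      rw [← hv] at hr'
      have hvmem : ∀ c ∈ v, c ≠ '&' := by
        intro c hc
        have := List.mem_takeWhile_imp (p := fun c => c != '&') (hv ▸ hc)
        simpa using this
      have hvsub : ∀ c ∈ v, c ∈ u := fun c hc => (hv ▸ (List.takeWhile_prefix _).subset) hc
      -- lstrip/rstrip decompositions of u
      have hlu := pv_lstrip_decomp u
      set w0 := u.takeWhile PySem.Chars.isspace with hw0
      set lu := PySem.Chars.lstrip u with hlu'
      obtain ⟨w1, hw1, hw1ws⟩ := pv_rstrip_decomp lu
      have hAmp_lu : '&' ∈ lu := pv_mem_lstrip hspAmp h2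
      have hAmp_rl : '&' ∈ PySem.Chars.rstrip lu := by
        rcases List.mem_append.1 (hw1 ▸ hAmp_lu) with h' | h'
        · exact h'
        · rw [hw1ws '&' h'] at hspAmp; cases hspAmp
      have hstripu : PySem.Chars.strip u = PySem.Chars.rstrip lu := pv_strip_eq_rstrip_lstrip u
      have memstrip : '&' ∈ PySem.Chars.strip u := hstripu ▸ hAmp_rl
      rw [if_pos ((pv_isIn_singleton '&' _).2 memstrip)]
      -- left side: takeWhile over strip u collapses to takeWhile over lu
      have step2 : (PySem.Chars.rstrip lu).takeWhile (fun c => c != '&')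
          = lu.takeWhile (fun c => c != '&') := by
        conv_rhs => rw [hw1]
        exact (pv_takeWhile_append_left _ _ _ ⟨'&', hAmp_rl, by simp⟩).symm
      have hw0ws : ∀ c ∈ w0, PySem.Chars.isspace c = true := fun c hc =>
        List.mem_takeWhile_imp (hw0 ▸ hc)
      have step3 : v = w0 ++ lu.takeWhile (fun c => c != '&') := by
        rw [hv]
        conv_lhs => rw [hlu]
        refine pv_takeWhile_all_append _ w0 lu ?_
        intro c hc
        have hws := hw0ws c hc
        have : c ≠ '&' := by rintro rfl; rw [hws] at hspAmp; cases hspAmp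
        simp [this]
      -- right side: the single scan stops at the '&'
      have ht : t = v ++ '&' :: (r' ++ '|' :: r) := by
        rw [hr, hr']; simp
      have hq : t.takeWhile (fun ch => !(ch == '|' || ch == '&')) = v := by
        conv_lhs => rw [ht]
        refine pv_takeWhile_stop _ v _ '&' ?_ (by simp)
        intro c hc
        have hna := hvmem c hc
        have hno := humem c (hvsub c hc)
        simp [hna, hno]
      have hlt : (t.takeWhile (fun ch => !(ch == '|' || ch == '&'))).length < t.length := by
        rw [hq]
        conv_rhs => rw [ht]
        simp
      simp only [pvCutB]
      rw [hq, if_pos (hq ▸ hlt)]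
      calc PySem.Chars.strip ((PySem.Chars.strip u).takeWhile (fun c => c != '&'))
          = PySem.Chars.strip (lu.takeWhile (fun c => c != '&')) := by rw [hstripu, step2]
        _ = PySem.Chars.strip (w0 ++ lu.takeWhile (fun c => c != '&')) :=
            (pv_strip_ws_append w0 _ hw0ws).symm
        _ = PySem.Chars.strip v := by rw [← step3]
    · have h2' : '&' ∉ PySem.Chars.strip u := fun hm => h2 (pv_mem_of_mem_strip hm)
      rw [if_neg (fun hc => h2' ((pv_isIn_singleton '&' _).1 hc))]
      have hq : (t.takeWhile (fun ch => !(ch == '|' || ch == '&'))) = u := by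
        conv_lhs => rw [hr]
        refine pv_takeWhile_stop _ u r '|' ?_ (by simp)
        intro c hc
        have hne : c ≠ '|' := humem c hc
        have hna : c ≠ '&' := fun e => h2 (e ▸ hc)
        simp [hne, hna]
      have hlt : u.length < t.length := by
        conv_rhs => rw [hr]
        simp
      simp only [pvCutB]
      rw [hq, if_pos hlt]
  · rw [if_neg (fun hc => h1 ((pv_isIn_singleton '|' t).1 hc))]
    by_cases h2 : '&' ∈ t
    · rw [if_pos ((pv_isIn_singleton '&' t).2 h2)]
      set v := t.takeWhile (fun c => c != '&') with hv
      obtain ⟨r, hr⟩ := pv_first_split '&' t h2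
      rw [← hv] at hr
      have hvmem : ∀ c ∈ v, c ≠ '&' := by
        intro c hc
        have := List.mem_takeWhile_imp (p := fun c => c != '&') (hv ▸ hc)
        simpa using this
      have hvsub : ∀ c ∈ v, c ∈ t := fun c hc => (hv ▸ (List.takeWhile_prefix _).subset) hc
      have hq : (t.takeWhile (fun ch => !(ch == '|' || ch == '&'))) = v := by
        conv_lhs => rw [hr]
        refine pv_takeWhile_stop _ v r '&' ?_ (by simp)
        intro c hc
        have hna : c ≠ '&' := hvmem c hc
        have hne : c ≠ '|' := fun e => h1 (e ▸ hvsub c hc)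
        simp [hne, hna]
      have hlt : v.length < t.length := by
        conv_rhs => rw [hr]
        simp
      simp only [pvCutB]
      rw [hq, if_pos hlt]
    · rw [if_neg (fun hc => h2 ((pv_isIn_singleton '&' t).1 hc))]
      have hq : (t.takeWhile (fun ch => !(ch == '|' || ch == '&'))) = t := by
        rw [List.takeWhile_eq_self_iff]
        intro c hc
        have hne : c ≠ '|' := fun e => h1 (e ▸ hc)
        have hna : c ≠ '&' := fun e => h2 (e ▸ hc)
        simp [hne, hna]
      simp only [pvCutB]
      rw [hq, if_neg (lt_irrefl _)]

theorem pvOuterGo_bscan (o c : Char) (hoc : o ≠ c) (full : List Char) (start : Nat)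
    (m : List Char) : ∀ (idx : Nat) (depth : Int), idx + m.length + 1 = full.length →
    pvOuterGoA o c full start (m ++ [c]) idx depth =
      (match pvBscan o c m depth with
       | none => none
       | some d => if d == 1 then
           some (PySem.Chars.strip ((full.drop (start+1)).dropLast)) else none) := by
  induction m with
  | nil =>
    intro idx depth hinv
    simp only [List.length_nil] at hinv
    have hco : (c == o) = false := by simp [Ne.symm hoc]
    have hcc : (c == c) = true := by simp
    simp only [List.nil_append, pvOuterGoA, pvBscan, hco, hcc, Bool.false_eq_true, if_false,
      if_true]
    by_cases hd : depth = 1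
    · have hd1 : (depth - 1 == 0) = true := by simp [hd]
      have hd2 : (depth == 1) = true := by simp [hd]
      have hidx : ¬ idx ≠ full.length - 1 := by omega
      simp only [hd1, hd2, if_true]
      rw [if_neg hidx]
      have hsl : PySem.List.slice full (some ((start+1 : Nat) : Int)) (some ((idx : Nat) : Int))
          = (full.drop (start+1)).dropLast := by
        rw [PySem.List.slice_natCast, List.dropLast_eq_take, List.length_drop]
        congr 1
        omega
      rw [hsl]
    · have hd1 : (depth - 1 == 0) = false := by simp; omega
      have hd2 : (depth == 1) = false := by simp [hd]
      simp [hd1, hd2]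
  | cons x m ih =>
    intro idx depth hinv
    simp only [List.length_cons] at hinv
    simp only [List.cons_append, pvOuterGoA, pvBscan]
    by_cases hx : x = o
    · have hx' : (x == o) = true := by simp [hx]
      simp only [hx', if_true]
      exact ih (idx+1) (depth+1) (by omega)
    · have hx' : (x == o) = false := by simp [hx]
      simp only [hx', Bool.false_eq_true, if_false]
      by_cases hc2 : x = c
      · have hc2' : (x == c) = true := by simp [hc2]
        simp only [hc2', if_true]
        by_cases hd : depth - 1 = 0
        · have hd1 : (depth - 1 == 0) = true := by simp [hd]
          simp only [hd1, if_true]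
          have hidx : idx ≠ full.length - 1 := by omega
          simp [hidx]
        · have hd1 : (depth - 1 == 0) = false := by simp [hd]
          simp only [hd1, Bool.false_eq_true, if_false]
          exact ih (idx+1) (depth-1) (by omega)
      · have hc2' : (x == c) = false := by simp [hc2]
        simp only [hc2', Bool.false_eq_true, if_false]
        exact ih (idx+1) depth (by omega)

theorem pvOuter_eq (t : List Char) (o c : Char) (hoc : o ≠ c) :
    pvOuterA t o c = pvInnerB1 t o c := by
  unfold pvOuterA pvInnerB1
  by_cases hE : PySem.Chars.endswith t [c] = true
  · simp only [hE, Bool.not_true, Bool.false_eq_true, if_false]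
    by_cases hS : PySem.Chars.find t [o] ≤ 0
    · rw [if_pos (by simp [hS]), if_pos hS]
    · rw [if_neg (by simp [hS]), if_neg hS]
      have hfind := PySem.Chars.find_spec (s := t) (sub := [o]) (by omega)
      have hlt : (PySem.Chars.find t [o]).toNat < t.length := by
        by_contra hge
        have h1 : t.drop (PySem.Chars.find t [o]).toNat = [] :=
          List.drop_eq_nil_of_le (by omega)
        rw [h1] at hfind
        exact absurd hfind.1 (by simp)
      obtain ⟨t', ht'⟩ : ∃ t', t = t' ++ [c] := by
        obtain ⟨t', ht'⟩ := (PySem.Chars.endswith_iff t [c]).1 hE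
        exact ⟨t', ht'.symm⟩
      set k := (PySem.Chars.find t [o]).toNat with hk
      have hk' : k ≤ t'.length := by
        have := ht' ▸ hlt
        simp at this
        omega
      have hdrop : t.drop k = t'.drop k ++ [c] := by
        rw [ht', List.drop_append_of_le_length hk']
      have hlen : k + (t'.drop k).length + 1 = t.length := by
        rw [ht']
        simp
        omega
      rw [hdrop, pvOuterGo_bscan o c hoc t k (t'.drop k) k 0 hlen,
        List.dropLast_concat]
  · have hE' : PySem.Chars.endswith t [c] = false := by simpa using hE
    simp [hE']

theorem pvNorm_eq (t : List Char) : pvNormA t = pvNormB t := by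
  simp only [pvNormA, pvNormB, List.foldl_cons, List.foldl_nil,
    pvStripPrefixA, pvStripSuffixA, List.length_cons, List.length_nil]

theorem pvTail_eq (rec : List Char → List Char) (u : List Char) :
    (match pvOuterA u '<' '>' with
     | some inner => rec (pvFirstSeg inner)
     | none => match pvOuterA u '[' ']' with
       | some inner => rec (pvFirstSeg inner)
       | none => u)
    = (match pvInnerB u with
       | none => u
       | some inner => rec (pvFirstSeg inner)) := by
  rw [pvOuter_eq u '<' '>' (by decide), pvOuter_eq u '[' ']' (by decide)]
  unfold pvInnerB
  cases pvInnerB1 u '<' '>' <;> cases pvInnerB1 u '[' ']' <;> simp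

theorem pvStep_eq (rec : List Char → List Char) (cs : List Char) :
    pvStepA rec cs = pvStepB rec cs := by
  unfold pvStepA pvStepB
  by_cases h0 : PySem.Chars.strip (pvLstripColon (PySem.Chars.strip cs)) = []
  · simp [h0]
  · simp only [h0, if_false]
    rw [pvNorm_eq, pvCut_eq, pvTail_eq rec]

theorem pvTbn_eq (fuel : Nat) (cs : List Char) : pvTbnA fuel cs = pvBLoop fuel cs := by
  induction fuel generalizing cs with
  | zero => rfl
  | succ f ih =>
    rw [pvTbnA, pvBLoop, pvStep_eq]
    have hrec : pvTbnA f = pvBLoop f := funext fun x => ih x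
    rw [hrec]

-- ===== VERDICT (by name: the statement is the Claim_ definition above) =====
theorem type_base_name_spec : Claim_equal_type_base_name := by
  intro s _
  unfold Spec_type_base_name type_base_name type_base_name_alt
  rw [pvTbn_eq]
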